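-- pv_equiv track=rewrite | github.com/chatpetey/va-bid-messaging | [ROOT - Technical Backend]/scripts/check_fedramp_evidence.py | verify_proof_chain
-- ===== SOURCE A (Python) =====
-- def verify_proof_chain(dep):
--     evidence = dep.get('evidence', []) if isinstance(dep, dict) else []
--     found = {
--         'ato_letter': False,
--         'ssp_summary': False,
--         'marketplace_url': False,
--         'marketplace_screenshot': False,
--         'sar_3pao': False,
--     }
--     for e in evidence:
--         t = e.get('type')
--         ref = (e.get('ref') or '').lower()
--         if t == 'doc' and 'ato' in ref:
--             found['ato_letter'] = True
--         if t == 'doc' and 'ssp' in ref: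
--             found['ssp_summary'] = True
--         if t == 'url' and 'marketplace' in ref:
--             found['marketplace_url'] = True
--         if t == 'screenshot' and 'marketplace' in ref:
--             found['marketplace_screenshot'] = True
--         if t == 'doc' and ('3pao' in ref or 'sar' in ref):
--             found['sar_3pao'] = True
--     ok = all(found.values())
--     return ok, found
-- ===== SOURCE B (Python) =====
-- RULES = [
--     ('ato_letter', 'doc', ('ato',)),
--     ('ssp_summary', 'doc', ('ssp',)),
--     ('marketplace_url', 'url', ('marketplace',)),
--     ('marketplace_screenshot', 'screenshot', ('marketplace',)),
--     ('sar_3pao', 'doc', ('3pao', 'sar')),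
-- ]
--
--
-- def _matches(e, typ, subs):
--     if e.get('type') != typ:
--         return False
--     ref = (e.get('ref') or '').lower()
--     return any(s in ref for s in subs)
--
--
-- def verify_proof_chain(dep):
--     evidence = dep.get('evidence', []) if isinstance(dep, dict) else []
--     found = {key: any(_matches(e, typ, subs) for e in evidence)
--              for key, typ, subs in RULES}
--     return all(found.values()), found
-- ===== Notes on version B (the rewrite author's own statement) =====
-- stated objective: simpler
-- what changed: Replaces A's single pass with hand-written per-key flag updates by a declarative rule table (key, type, substrings) and a dict comprehension that sets each flag with one any() scan per rule.
import Mathlib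
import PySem

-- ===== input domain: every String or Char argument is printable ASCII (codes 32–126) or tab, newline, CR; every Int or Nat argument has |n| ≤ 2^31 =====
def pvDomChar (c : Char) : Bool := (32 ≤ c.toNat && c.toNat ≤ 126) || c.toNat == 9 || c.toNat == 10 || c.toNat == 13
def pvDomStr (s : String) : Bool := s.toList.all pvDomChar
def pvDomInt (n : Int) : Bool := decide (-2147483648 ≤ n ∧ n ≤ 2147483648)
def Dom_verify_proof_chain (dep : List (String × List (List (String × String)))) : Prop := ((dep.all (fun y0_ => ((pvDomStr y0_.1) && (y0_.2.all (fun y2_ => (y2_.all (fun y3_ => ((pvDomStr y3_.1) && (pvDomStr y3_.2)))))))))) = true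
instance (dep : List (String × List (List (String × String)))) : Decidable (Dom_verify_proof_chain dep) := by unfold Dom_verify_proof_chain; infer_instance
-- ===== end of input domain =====

-- B replaces A's single pass with hand-written per-key flag updates by a declarative
-- rule table (key, type, substrings) and one any()-scan of the evidence per rule;
-- objective: simpler.

-- shared helper: (e.get('ref') or '').lower() — computed identically by both Pythons
def pvRefOf (e : List (String × String)) : String :=
  PySem.Str.lower (match (PySem.Dict.mk e).get? "ref" with
    | none => "" | some r => if r = "" then "" else r)

-- ===== PORT A =====
-- one iteration of A's for-loop over the evidence list, updating the `found` dict
def pvStepA (found : PySem.Dict String Bool) (e : List (String × String)) :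
    PySem.Dict String Bool :=
  let t := (PySem.Dict.mk e).get? "type"
  let ref := pvRefOf e
  let found := if t = some "doc" ∧ PySem.Str.isIn "ato" ref then
    found.insert "ato_letter" true else found
  let found := if t = some "doc" ∧ PySem.Str.isIn "ssp" ref then
    found.insert "ssp_summary" true else found
  let found := if t = some "url" ∧ PySem.Str.isIn "marketplace" ref then
    found.insert "marketplace_url" true else found
  let found := if t = some "screenshot" ∧ PySem.Str.isIn "marketplace" ref then
    found.insert "marketplace_screenshot" true else found
  let found := if t = some "doc" ∧ (PySem.Str.isIn "3pao" ref ∨ PySem.Str.isIn "sar" ref) then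
    found.insert "sar_3pao" true else found
  found

def verify_proof_chain (dep : List (String × List (List (String × String)))) :
    Bool × (List (String × Bool)) :=
  let evidence := (PySem.Dict.mk dep).getD "evidence" []
  let found : PySem.Dict String Bool := PySem.Dict.mk
    [("ato_letter", false), ("ssp_summary", false), ("marketplace_url", false),
     ("marketplace_screenshot", false), ("sar_3pao", false)]
  let found := evidence.foldl pvStepA found
  let ok := found.values.all (fun b => b)
  (ok, found.items)

-- ===== PORT B =====
def pvRules : List (String × String × List String) :=
  [("ato_letter", "doc", ["ato"]),
   ("ssp_summary", "doc", ["ssp"]),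
   ("marketplace_url", "url", ["marketplace"]),
   ("marketplace_screenshot", "screenshot", ["marketplace"]),
   ("sar_3pao", "doc", ["3pao", "sar"])]

def pvMatches (e : List (String × String)) (typ : String) (subs : List String) : Bool :=
  if (PySem.Dict.mk e).get? "type" ≠ some typ then false
  else subs.any (fun s => PySem.Str.isIn s (pvRefOf e))

def verify_proof_chain_alt (dep : List (String × List (List (String × String)))) :
    Bool × (List (String × Bool)) :=
  let evidence := (PySem.Dict.mk dep).getD "evidence" []
  let found := pvRules.map (fun r => (r.1, evidence.any (fun e => pvMatches e r.2.1 r.2.2)))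
  ((found.map (·.2)).all (fun b => b), found)

-- ===== PRECONDITION & SPEC =====
def Spec_verify_proof_chain (dep : List (String × List (List (String × String)))) (out : Bool × (List (String × Bool))) : Prop := out = verify_proof_chain_alt dep
instance (dep : List (String × List (List (String × String)))) (out : Bool × (List (String × Bool))) : Decidable (Spec_verify_proof_chain dep out) := by unfold Spec_verify_proof_chain; infer_instance

-- ===== CLAIM (what is proved, stated in full; the proofs are below) =====
def Claim_equal_verify_proof_chain : Prop := ∀ (dep : List (String × List (List (String × String)))), Dom_verify_proof_chain dep → Spec_verify_proof_chain dep (verify_proof_chain dep)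

-- ===== LEMMAS AND PROOFS =====

-- A's five-flag dict with arbitrary flag values (proof-only abbreviation)
def pvD (b1 b2 b3 b4 b5 : Bool) : PySem.Dict String Bool :=
  PySem.Dict.mk
    [("ato_letter", b1), ("ssp_summary", b2), ("marketplace_url", b3),
     ("marketplace_screenshot", b4), ("sar_3pao", b5)]

lemma pvIns1 (P : Prop) [Decidable P] (b1 b2 b3 b4 b5 : Bool) :
    (if P then (pvD b1 b2 b3 b4 b5).insert "ato_letter" true else pvD b1 b2 b3 b4 b5)
      = pvD (b1 || decide P) b2 b3 b4 b5 := by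
  split_ifs with h <;> simp [pvD, PySem.Dict.insert, h]

lemma pvIns2 (P : Prop) [Decidable P] (b1 b2 b3 b4 b5 : Bool) :
    (if P then (pvD b1 b2 b3 b4 b5).insert "ssp_summary" true else pvD b1 b2 b3 b4 b5)
      = pvD b1 (b2 || decide P) b3 b4 b5 := by
  split_ifs with h <;> simp [pvD, PySem.Dict.insert, h]

lemma pvIns3 (P : Prop) [Decidable P] (b1 b2 b3 b4 b5 : Bool) :
    (if P then (pvD b1 b2 b3 b4 b5).insert "marketplace_url" true else pvD b1 b2 b3 b4 b5)
      = pvD b1 b2 (b3 || decide P) b4 b5 := by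
  split_ifs with h <;> simp [pvD, PySem.Dict.insert, h]

lemma pvIns4 (P : Prop) [Decidable P] (b1 b2 b3 b4 b5 : Bool) :
    (if P then (pvD b1 b2 b3 b4 b5).insert "marketplace_screenshot" true else pvD b1 b2 b3 b4 b5)
      = pvD b1 b2 b3 (b4 || decide P) b5 := by
  split_ifs with h <;> simp [pvD, PySem.Dict.insert, h]

lemma pvIns5 (P : Prop) [Decidable P] (b1 b2 b3 b4 b5 : Bool) :
    (if P then (pvD b1 b2 b3 b4 b5).insert "sar_3pao" true else pvD b1 b2 b3 b4 b5)
      = pvD b1 b2 b3 b4 (b5 || decide P) := by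
  split_ifs with h <;> simp [pvD, PySem.Dict.insert, h]

lemma pvMatches_eq1 (e : List (String × String)) (typ s : String) :
    pvMatches e typ [s]
      = decide ((PySem.Dict.mk e).get? "type" = some typ ∧ PySem.Str.isIn s (pvRefOf e)) := by
  by_cases h : (PySem.Dict.mk e).get? "type" = some typ <;> simp [pvMatches, h]

lemma pvMatches_eq2 (e : List (String × String)) (typ s t : String) :
    pvMatches e typ [s, t]
      = decide ((PySem.Dict.mk e).get? "type" = some typ ∧
          (PySem.Str.isIn s (pvRefOf e) ∨ PySem.Str.isIn t (pvRefOf e))) := by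
  by_cases h : (PySem.Dict.mk e).get? "type" = some typ <;> simp [pvMatches, h]

-- one loop step of A flips each of the five flags exactly when B's rule matches
lemma pvStepA_eq (e : List (String × String)) (b1 b2 b3 b4 b5 : Bool) :
    pvStepA (pvD b1 b2 b3 b4 b5) e =
    pvD (b1 || pvMatches e "doc" ["ato"])
        (b2 || pvMatches e "doc" ["ssp"])
        (b3 || pvMatches e "url" ["marketplace"])
        (b4 || pvMatches e "screenshot" ["marketplace"])
        (b5 || pvMatches e "doc" ["3pao", "sar"]) := by
  rw [pvMatches_eq1, pvMatches_eq1, pvMatches_eq1, pvMatches_eq1, pvMatches_eq2]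
  simp only [pvStepA]
  rw [pvIns1, pvIns2, pvIns3, pvIns4, pvIns5]

-- A's whole loop, from arbitrary flag values
lemma pvLoopA_eq (es : List (List (String × String))) (b1 b2 b3 b4 b5 : Bool) :
    es.foldl pvStepA (pvD b1 b2 b3 b4 b5) =
    pvD (b1 || es.any (fun e => pvMatches e "doc" ["ato"]))
        (b2 || es.any (fun e => pvMatches e "doc" ["ssp"]))
        (b3 || es.any (fun e => pvMatches e "url" ["marketplace"]))
        (b4 || es.any (fun e => pvMatches e "screenshot" ["marketplace"]))
        (b5 || es.any (fun e => pvMatches e "doc" ["3pao", "sar"])) := by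
  induction es generalizing b1 b2 b3 b4 b5 with
  | nil => simp
  | cons e es ih =>
      rw [List.foldl_cons, pvStepA_eq, ih]
      simp [Bool.or_assoc]

-- ===== VERDICT (by name: the statement is the Claim_ definition above) =====
theorem verify_proof_chain_spec : Claim_equal_verify_proof_chain := by
  intro dep _
  show verify_proof_chain dep = verify_proof_chain_alt dep
  unfold verify_proof_chain verify_proof_chain_alt
  have h := pvLoopA_eq ((PySem.Dict.mk dep).getD "evidence" []) false false false false false
  simp only [pvD] at h
  simp only [h, pvRules]
  simp [PySem.Dict.values]
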